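-- pv_equiv track=rewrite | github.com/VishnuVardhan34/Intrusion-Detection-System | sdpd_phm.py | pick_representative
-- ===== SOURCE A (Python) =====
-- def pick_representative(pred, used_set):
--     if pred == "OTHER":
--         # pick a char not in used_set (simple choice)
--         for i in range(32, 127):
--             ch = chr(i)
--             if ch not in used_set:
--                 return ch
--         return '\0'
--     # pred like "'a'"
--     return pred.strip("'")
-- ===== SOURCE B (Python) =====
-- def pick_representative(pred, used_set):
--     if pred == "OTHER":
--         remainder = {chr(i) for i in range(32, 127)} - set(used_set)
--         if remainder:
--             return min(remainder)
--         return '\0'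
--     return pred.strip("'")
-- ===== Notes on version B (the rewrite author's own statement) =====
-- stated objective: idiomatic
-- what changed: Replaces A's early-exit linear scan over ordinals 32..126 with an eager set difference (printable set minus used_set) followed by min(), falling back to '\0' when the remainder is empty.
import Mathlib
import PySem

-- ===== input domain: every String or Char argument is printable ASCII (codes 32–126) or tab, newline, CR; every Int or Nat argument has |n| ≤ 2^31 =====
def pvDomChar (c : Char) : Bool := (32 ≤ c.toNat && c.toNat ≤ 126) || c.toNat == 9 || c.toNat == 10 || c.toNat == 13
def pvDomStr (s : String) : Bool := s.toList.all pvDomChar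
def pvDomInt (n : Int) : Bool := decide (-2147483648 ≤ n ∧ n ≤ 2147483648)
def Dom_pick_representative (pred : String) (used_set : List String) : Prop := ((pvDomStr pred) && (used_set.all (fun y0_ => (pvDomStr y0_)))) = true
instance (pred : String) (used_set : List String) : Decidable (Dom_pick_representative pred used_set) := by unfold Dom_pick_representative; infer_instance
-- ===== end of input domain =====

-- B replaces A's early-exit linear scan with a set difference (printables minus used) followed by min(), falling back to '\0' on an empty remainder (objective: idiomatic).

-- ===== PORT A =====
-- the 'for i in range(32,127): … return ch / return '\0'' loop, step for step
def pickLoopA (used_set : List String) : List Int → String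
  | [] => String.ofList [Char.ofNat 0]
  | i :: rest =>
    let ch := String.ofList [Char.ofNat i.toNat]
    if used_set.contains ch then pickLoopA used_set rest else ch

def pick_representative (pred : String) (used_set : List String) : String :=
  if pred = "OTHER" then
    pickLoopA used_set (PySem.List.pyRange 32 127 1)
  else
    PySem.Str.stripChars pred "'"

-- ===== PORT B =====
def pick_representative_alt (pred : String) (used_set : List String) : String :=
  if pred = "OTHER" then
    let printable : PySem.Set String :=
      PySem.Set.ofList ((PySem.List.pyRange 32 127 1).map (fun i => String.ofList [Char.ofNat i.toNat]))
    let remainder := PySem.Set.diff printable (PySem.Set.ofList used_set)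
    match PySem.List.min? remainder (fun s => s) with
    | some m => m
    | none => String.ofList [Char.ofNat 0]
  else
    PySem.Str.stripChars pred "'"

-- ===== PRECONDITION & SPEC =====
def Spec_pick_representative (pred : String) (used_set : List String) (out : String) : Prop := out = pick_representative_alt pred used_set
instance (pred : String) (used_set : List String) (out : String) : Decidable (Spec_pick_representative pred used_set out) := by unfold Spec_pick_representative; infer_instance

-- ===== CLAIM (what is proved, stated in full; the proofs are below) =====
def Claim_equal_pick_representative : Prop := ∀ (pred : String) (used_set : List String), Dom_pick_representative pred used_set → Spec_pick_representative pred used_set (pick_representative pred used_set)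

-- ===== LEMMAS AND PROOFS =====

-- A's scan over any index list returns the first unused mapped string (head of the filter)
lemma pickLoopA_eq_filter (used_set : List String) (l : List Int) :
    pickLoopA used_set l =
      ((l.map (fun i => String.ofList [Char.ofNat i.toNat])).filter
        (fun s => !used_set.contains s)).headD (String.ofList [Char.ofNat 0]) := by
  induction l with
  | nil => rfl
  | cons i rest ih =>
    by_cases hm : String.ofList [Char.ofNat i.toNat] ∈ used_set
    · simp [pickLoopA, hm, ih]
    · simp [pickLoopA, hm]

-- min? of a strictly increasing list is its head
lemma min?_of_pairwise_lt {l : List String} (h : l.Pairwise (· < ·)) :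
    PySem.List.min? l (fun s => s) = l.head? := by
  cases l with
  | nil => simp [PySem.List.min?]
  | cons x t =>
    rcases hm : PySem.List.min? (x :: t) (fun s => s) with _ | m
    · exact absurd ((PySem.List.min?_eq_none_iff _ _).mp hm) (by simp)
    · have hmem := PySem.List.min?_mem hm
      have hmin := PySem.List.min?_isMin hm
      rcases List.mem_cons.mp hmem with rfl | hmt
      · rfl
      · have hlt : x < m := (List.pairwise_cons.mp h).1 m hmt
        have hle : m ≤ x := hmin x (by simp)
        exact absurd hle (not_le.mpr hlt)

lemma contains_ofList (used_set : List String) (x : String) :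
    (PySem.Set.ofList used_set).contains x = used_set.contains x := by
  by_cases hx : x ∈ used_set
  · simp [hx, (PySem.Set.mem_ofList used_set x).mpr hx]
  · have hn : x ∉ PySem.Set.ofList used_set := fun h => hx ((PySem.Set.mem_ofList used_set x).mp h)
    simp [hx, hn]

-- a fold of Set.add over fresh distinct elements appends them all
lemma foldl_add_of_nodup (l : List String) : ∀ acc : List String,
    (∀ x ∈ l, acc.contains x = false) → l.Nodup →
    l.foldl PySem.Set.add acc = acc ++ l := by
  induction l with
  | nil => intro acc _ _; simp
  | cons x t ih =>
    intro acc hd hl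
    have hx : acc.contains x = false := hd x (by simp)
    have hx' : x ∉ acc := by simpa using hx
    have hadd : PySem.Set.add acc x = acc ++ [x] := by simp [PySem.Set.add, hx']
    rw [List.foldl_cons, hadd, ih (acc ++ [x]) ?_ (List.nodup_cons.mp hl).2]
    · simp
    · intro y hy
      have hne : y ≠ x := fun h => (List.nodup_cons.mp hl).1 (h ▸ hy)
      have hyacc : acc.contains y = false := hd y (List.mem_cons_of_mem _ hy)
      simp_all

-- the mapped printable range is strictly increasing as strings
lemma printable_pairwise :
    (List.map (fun i => String.ofList [Char.ofNat i.toNat]) (PySem.List.pyRange 32 127 1)).Pairwise (· < ·) := by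
  refine List.pairwise_map.mpr ?_
  refine (PySem.List.pairwise_lt_pyRange_one 32 127).imp_of_mem ?_
  intro a b ha hb hab
  have ha' := PySem.List.mem_pyRange_one.mp ha
  have hb' := PySem.List.mem_pyRange_one.mp hb
  have hva : Nat.isValidChar a.toNat := Or.inl (by omega)
  have hvb : Nat.isValidChar b.toNat := Or.inl (by omega)
  have hlt : a.toNat < b.toNat := by omega
  have hc : Char.ofNat a.toNat < Char.ofNat b.toNat := by
    simp [Char.ofNat, hva, hvb, Char.ofNatAux, Char.lt_def]
    simp [UInt32.lt_iff_toNat_lt, hlt]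
  rw [String.lt_iff_toList_lt]
  simpa using List.Lex.rel hc

-- ===== VERDICT (by name: the statement is the Claim_ definition above) =====
set_option maxRecDepth 40000 in
set_option maxHeartbeats 2000000 in
theorem pick_representative_spec : Claim_equal_pick_representative := by
  intro pred used_set _
  unfold Spec_pick_representative pick_representative pick_representative_alt
  by_cases hp : pred = "OTHER"
  · rw [if_pos hp, if_pos hp, pickLoopA_eq_filter]
    have hofM : PySem.Set.ofList ((PySem.List.pyRange 32 127 1).map (fun i => String.ofList [Char.ofNat i.toNat])) = (PySem.List.pyRange 32 127 1).map (fun i => String.ofList [Char.ofNat i.toNat]) := by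
      simpa [PySem.Set.ofList] using
        foldl_add_of_nodup _ [] (fun x _ => rfl) (printable_pairwise.imp (fun h => ne_of_lt h))
    have hfilter' : PySem.Set.diff (PySem.Set.ofList ((PySem.List.pyRange 32 127 1).map (fun i => String.ofList [Char.ofNat i.toNat]))) (PySem.Set.ofList used_set) = ((PySem.List.pyRange 32 127 1).map (fun i => String.ofList [Char.ofNat i.toNat])).filter (fun s => !used_set.contains s) := by
      rw [hofM]
      unfold PySem.Set.diff
      exact List.filter_congr (fun x _ => by rw [contains_ofList])
    simp only [hfilter', min?_of_pairwise_lt (printable_pairwise.filter _)]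
    generalize ((PySem.List.pyRange 32 127 1).map (fun i => String.ofList [Char.ofNat i.toNat])).filter (fun s => !used_set.contains s) = R
    cases R <;> rfl
  · rw [if_neg hp, if_neg hp]
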